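-- pv_equiv track=rewrite | github.com/FilipBudac/adventofcode | 2018/01/b.py | find_2nd_occurrence
-- ===== SOURCE A (Python) =====
-- import itertools
--
-- def find_2nd_occurrence(nums):
--     tot = 0
--     seen = set()
--     for num in itertools.cycle(nums):
--         tot += num
--
--         if tot in seen:
--             return tot
--
--         seen.add(tot)
-- ===== SOURCE B (Python) =====
-- def find_2nd_occurrence(nums):
--     prefix = []
--     tot = 0
--     for x in nums:
--         tot += x
--         prefix.append(tot)
--     n = len(prefix)
--     total = prefix[-1]
--     if total == 0:
--         for j in range(n):
--             if prefix[j] in prefix[:j]: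
--                 return prefix[j]
--         return prefix[0]
--     best = None  # (cycle count, position, repeated value)
--     for j in range(n):
--         for i in range(n):
--             diff = prefix[i] - prefix[j]
--             if i != j and diff % total == 0:
--                 d = diff // total
--                 if d > 0 or (d == 0 and i < j):
--                     if best is None or (d, j) < (best[0], best[1]):
--                         best = (d, j, prefix[i])
--     return best[2]
-- ===== Notes on version B (the rewrite author's own statement) =====
-- stated objective: alternative
-- what changed: A simulates the cycled running total step by step with a seen-set until a repeat; B computes the first-cycle prefix sums once and finds the earliest repeat in closed form: with total 0 a single duplicate scan of the first cycle, otherwise the lexicographically earliest (cycle gap, position) pair of prefix sums congruent modulo the total.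
-- outside the precondition, e.g. on find_2nd_occurrence([]): A returns None, B raises IndexError; on find_2nd_occurrence([1]): A does not finish within the time limit, B raises TypeError
import Mathlib
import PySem

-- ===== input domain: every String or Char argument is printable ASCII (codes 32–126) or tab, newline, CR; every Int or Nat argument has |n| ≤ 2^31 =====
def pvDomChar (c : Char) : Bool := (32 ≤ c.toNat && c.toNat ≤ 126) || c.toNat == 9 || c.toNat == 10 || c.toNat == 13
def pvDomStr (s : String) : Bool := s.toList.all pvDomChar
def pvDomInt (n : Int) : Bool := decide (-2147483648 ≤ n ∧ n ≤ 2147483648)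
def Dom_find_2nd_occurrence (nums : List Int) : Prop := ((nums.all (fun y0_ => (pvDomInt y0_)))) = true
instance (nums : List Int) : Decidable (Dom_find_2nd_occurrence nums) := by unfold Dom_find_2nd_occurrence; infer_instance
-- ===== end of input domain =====

-- B replaces A's unbounded cycle-and-remember simulation by a closed-form scan over pairs of
-- first-cycle prefix sums (congruent mod the list total), picking the earliest collision; objective: alternative.

-- ===== PORT A =====
-- itertools.cycle(nums) yields nums[t % len(nums)] at step t; the unbounded 'for' is totalized
-- with a fuel that provably exceeds the first-repeat step on every input satisfying Pre_
-- (the fuel-out branch is never reached there); exact transliteration of A's loop body.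
def pvLoopA (nums : List Int) : Nat → Nat → Int → PySem.Set Int → Int
  | 0, _, tot, _ => tot
  | fuel+1, t, tot, seen =>
    let tot2 := tot + nums.getD (t % nums.length) 0
    if PySem.Set.contains seen tot2 then tot2
    else pvLoopA nums fuel (t+1) tot2 (PySem.Set.add seen tot2)

def pvFuelA (nums : List Int) : Nat :=
  nums.length * (2 * (nums.map Int.natAbs).sum + 2)

def find_2nd_occurrence (nums : List Int) : Int :=
  pvLoopA nums (pvFuelA nums) 0 0 PySem.Set.empty

-- ===== PORT B =====
-- prefix-sum list built exactly as Source B's first loop does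
def pvPrefix (nums : List Int) : List Int :=
  (nums.foldl (fun (acc : List Int × Int) x => (acc.1 ++ [acc.2 + x], acc.2 + x)) ([], 0)).1

-- Source B's S == 0 duplicate scan: 'if prefix[j] in prefix[:j]: return prefix[j]'
def pvScanDup : List Int → List Int → Option Int
  | _, [] => none
  | earlier, x :: rest => if earlier.contains x then some x else pvScanDup (earlier ++ [x]) rest

-- Source B's inner-loop body for one pair (j, i); best = (cycle count d, position j, repeated value)
def pvStep (pfx : List Int) (total : Int) (j i : Nat)
    (best : Option (Int × Nat × Int)) : Option (Int × Nat × Int) :=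
  let diff := pfx.getD i 0 - pfx.getD j 0
  if i ≠ j ∧ PySem.Int.mod diff total = 0 then
    let d := PySem.Int.floordiv diff total
    if 0 < d ∨ (d = 0 ∧ i < j) then
      match best with
      | none => some (d, j, pfx.getD i 0)
      | some (bd, bj, bv) =>
        if d < bd ∨ (d = bd ∧ j < bj) then some (d, j, pfx.getD i 0) else some (bd, bj, bv)
    else best
  else best

def pvBest (pfx : List Int) (total : Int) : Option (Int × Nat × Int) :=
  (List.range pfx.length).foldl
    (fun best j => (List.range pfx.length).foldl (fun best i => pvStep pfx total j i best) best)
    none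

def find_2nd_occurrence_alt (nums : List Int) : Int :=
  let pfx := pvPrefix nums
  let total := PySem.List.pyGetD pfx (-1) 0   -- prefix[-1]; exact: pfx ≠ [] under Pre_
  if total = 0 then
    match pvScanDup [] pfx with
    | some v => v
    | none => pfx.getD 0 0
  else
    match pvBest pfx total with
    | some (_, _, v) => v
    | none => 0   -- best is None: Python raises TypeError; unreachable under Pre_

-- ===== PRECONDITION & SPEC =====
-- prefix sum of the first k+1 elements (proof-side mirror, independent of both ports)
def pvPsum (nums : List Int) (k : Nat) : Int := (nums.take (k+1)).sum

-- Pre_ excludes the empty list (A returns None, not an int; B raises IndexError) and the inputs on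
-- which A never terminates: total ≠ 0 and no two distinct first-cycle prefix sums congruent mod total.
def Pre_find_2nd_occurrence (nums : List Int) : Prop :=
  nums ≠ [] ∧
  (pvPsum nums (nums.length - 1) = 0 ∨
   ∃ i < nums.length, ∃ j < nums.length,
     i ≠ j ∧ pvPsum nums (nums.length - 1) ∣ (pvPsum nums i - pvPsum nums j))
instance (nums : List Int) : Decidable (Pre_find_2nd_occurrence nums) := by
  unfold Pre_find_2nd_occurrence; infer_instance

def pvWitness_find_2nd_occurrence : List Int := [1, -1]

def Spec_find_2nd_occurrence (nums : List Int) (out : Int) : Prop := out = find_2nd_occurrence_alt nums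
instance (nums : List Int) (out : Int) : Decidable (Spec_find_2nd_occurrence nums out) := by
  unfold Spec_find_2nd_occurrence; infer_instance

-- ===== CLAIM (what is proved, stated in full; the proofs are below) =====
def Claim_equal_find_2nd_occurrence : Prop := ∀ (nums : List Int), Dom_find_2nd_occurrence nums → Pre_find_2nd_occurrence nums → Spec_find_2nd_occurrence nums (find_2nd_occurrence nums)

-- ===== LEMMAS AND PROOFS =====

-- the frequency reached after step t of A's infinite walk
def pvF (nums : List Int) : Nat → Int
  | 0 => nums.getD 0 0
  | t+1 => pvF nums t + nums.getD ((t+1) % nums.length) 0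

-- "the frequency at step t was already seen at an earlier step"
def pvCollideB (nums : List Int) (t : Nat) : Bool :=
  (List.range t).any (fun s => pvF nums s == pvF nums t)

theorem pvCollideB_iff (nums : List Int) (t : Nat) :
    pvCollideB nums t = true ↔ ∃ s < t, pvF nums s = pvF nums t := by
  simp [pvCollideB]

theorem pvPsum_zero (nums : List Int) : pvPsum nums 0 = nums.getD 0 0 := by
  cases nums <;> simp [pvPsum]

theorem pvPsum_succ (nums : List Int) (k : Nat) (h : k + 1 < nums.length) :
    pvPsum nums (k+1) = pvPsum nums k + nums.getD (k+1) 0 := by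
  have h' : k + 1 < nums.length := h
  simp [pvPsum, List.take_add_one, List.getD_eq_getElem?_getD, List.getElem?_eq_getElem h']
  ring

-- the step relation of div/mod needed for the closed form (omega handles only literal divisors)
theorem pvDivModStep (n t : Nat) (hn : 0 < n) :
    ((t+1) % n = 0 ∧ t % n = n - 1 ∧ (t+1) / n = t / n + 1) ∨
    ((t+1) % n = t % n + 1 ∧ (t+1) / n = t / n ∧ t % n + 1 < n) := by
  have hdm := Nat.div_add_mod t n
  have hlt : t % n < n := Nat.mod_lt _ hn
  by_cases h : t % n + 1 = n
  · left
    have e' : n * (t / n + 1) = n * (t / n) + n := by ring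
    have e : t + 1 = n * (t / n + 1) := by omega
    constructor
    · rw [e, Nat.mul_mod_right]
    constructor
    · omega
    · rw [e, Nat.mul_div_cancel_left _ hn]
  · right
    have hlt2 : t % n + 1 < n := by omega
    have e : t + 1 = n * (t / n) + (t % n + 1) := by omega
    refine ⟨?_, ?_, hlt2⟩
    · rw [e, Nat.mul_add_mod, Nat.mod_eq_of_lt hlt2]
    · rw [e, Nat.mul_add_div hn, Nat.div_eq_of_lt hlt2]; omega

-- closed form of the walk: pvF t = prefix[t % n] + (t / n) * total
theorem pvF_closed (nums : List Int) (hn : nums ≠ []) (t : Nat) :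
    pvF nums t = pvPsum nums (t % nums.length)
      + ((t / nums.length : Nat) : Int) * pvPsum nums (nums.length - 1) := by
  have hn0 : 0 < nums.length := List.length_pos_of_ne_nil hn
  induction t with
  | zero =>
    simp [pvF, Nat.mod_eq_of_lt hn0, Nat.div_eq_of_lt hn0, pvPsum_zero]
  | succ t ih =>
    rcases pvDivModStep nums.length t hn0 with ⟨h0, h1, h2⟩ | ⟨h0, h1, h2⟩
    · rw [pvF, ih, h0, h1, h2, pvPsum_zero]
      push_cast
      ring
    · rw [pvF, ih, h0, h1, pvPsum_succ _ _ h2]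
      ring

-- ==== A-side: the loop returns pvF T for the least colliding step T ====

theorem pvLoopA_spec (nums : List Int) (T : Nat)
    (hT : pvCollideB nums T = true) (hmin : ∀ s, s < T → pvCollideB nums s = false) :
    ∀ fuel t tot seen, t ≤ T → T < t + fuel →
      (tot + nums.getD (t % nums.length) 0 = pvF nums t) →
      (∀ x, PySem.Set.contains seen x = true ↔ ∃ s < t, pvF nums s = x) →
      pvLoopA nums fuel t tot seen = pvF nums T := by
  intro fuel
  induction fuel with
  | zero => intro t tot seen h1 h2 _ _; omega
  | succ fuel ih =>
    intro t tot seen h1 h2 htot hseen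
    rw [pvLoopA]
    by_cases hc : PySem.Set.contains seen (tot + nums.getD (t % nums.length) 0) = true
    · rw [if_pos hc, htot]
      rw [htot, hseen] at hc
      have hct : pvCollideB nums t = true := (pvCollideB_iff ..).2 hc
      have het : t = T := by
        by_contra hne
        have hlt : t < T := lt_of_le_of_ne h1 hne
        rw [hmin t hlt] at hct
        exact Bool.noConfusion hct
      rw [het]
    · rw [if_neg hc]
      have hnc : ¬ pvCollideB nums t = true := by
        rw [pvCollideB_iff]
        intro hex
        exact hc (by rw [htot, hseen]; exact hex)
      have hlt : t < T := lt_of_le_of_ne h1 (fun e => hnc (e ▸ hT))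
      refine ih (t+1) _ _ hlt (by omega) (by rw [htot]; rfl) ?_
      intro x
      have : x ∈ PySem.Set.add seen (tot + nums.getD (t % nums.length) 0) ↔
          x ∈ seen ∨ x = tot + nums.getD (t % nums.length) 0 := PySem.Set.mem_add ..
      simp only [PySem.Set.contains] at *
      simp only [List.contains_iff_mem] at *
      rw [this, htot]
      constructor
      · rintro (hx | rfl)
        · obtain ⟨s, hs, he⟩ := (hseen x).1 (by simpa using hx)
          exact ⟨s, by omega, he⟩
        · exact ⟨t, by omega, rfl⟩
      · rintro ⟨s, hs, he⟩
        by_cases hst : s = t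
        · right; rw [← hst, he]
        · left
          have := (hseen x).2 ⟨s, by omega, he⟩
          simpa using this

theorem pvSum_natAbs_le (l : List Int) : l.sum.natAbs ≤ (l.map Int.natAbs).sum := by
  induction l with
  | nil => simp
  | cons x xs ih =>
    simp only [List.sum_cons, List.map_cons]
    calc (x + xs.sum).natAbs ≤ x.natAbs + xs.sum.natAbs := Int.natAbs_add_le _ _
    _ ≤ x.natAbs + (xs.map Int.natAbs).sum := by omega

theorem pvPsum_natAbs_le (nums : List Int) (k : Nat) :
    (pvPsum nums k).natAbs ≤ (nums.map Int.natAbs).sum := by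
  calc (pvPsum nums k).natAbs ≤ ((nums.take (k+1)).map Int.natAbs).sum := pvSum_natAbs_le _
  _ ≤ (nums.map Int.natAbs).sum := by
      conv_rhs => rw [← List.take_append_drop (k+1) nums]
      rw [List.map_append, List.sum_append]
      omega

-- ==== the walk below the first full cycle, and at step c*n+j ====

theorem pvF_small (nums : List Int) (hn : nums ≠ []) (u : Nat) (hu : u < nums.length) :
    pvF nums u = pvPsum nums u := by
  rw [pvF_closed nums hn, Nat.mod_eq_of_lt hu, Nat.div_eq_of_lt hu]
  simp

theorem pvF_at (nums : List Int) (hn : nums ≠ []) (c j : Nat) (hj : j < nums.length) :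
    pvF nums (c * nums.length + j)
      = pvPsum nums j + (c : Int) * pvPsum nums (nums.length - 1) := by
  have hn0 : 0 < nums.length := List.length_pos_of_ne_nil hn
  rw [pvF_closed nums hn]
  have h1 : (c * nums.length + j) % nums.length = j := by
    rw [Nat.mul_add_mod', Nat.mod_eq_of_lt hj]
  have h2 : (c * nums.length + j) / nums.length = c := by
    rw [Nat.mul_comm c nums.length, Nat.add_comm, Nat.add_mul_div_left _ _ hn0,
      Nat.div_eq_of_lt hj]
    omega
  rw [h1, h2]

-- a congruent pair with cycle gap d and positions (j, i)
def pvCnd (nums : List Int) (d : Int) (j i : Nat) : Prop :=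
  i < nums.length ∧ j < nums.length ∧ i ≠ j ∧
  pvPsum nums i - pvPsum nums j = d * pvPsum nums (nums.length - 1) ∧
  (0 < d ∨ (d = 0 ∧ i < j))

theorem pvCnd_nonneg {nums : List Int} {d : Int} {j i : Nat} (h : pvCnd nums d j i) : 0 ≤ d := by
  rcases h.2.2.2.2 with h' | h' <;> omega

theorem pvCnd_collide (nums : List Int) (hn : nums ≠ []) {d : Int} {j i : Nat}
    (h : pvCnd nums d j i) :
    pvCollideB nums (d.toNat * nums.length + j) = true := by
  obtain ⟨hi, hj, hne, heq, hcase⟩ := h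
  rw [pvCollideB_iff]
  refine ⟨i, ?_, ?_⟩
  · rcases hcase with hd | ⟨hd, hij⟩
    · have h1 : 1 ≤ d.toNat := by omega
      have : 1 * nums.length ≤ d.toNat * nums.length := Nat.mul_le_mul_right _ h1
      omega
    · simp [hd, hij]
  · rw [pvF_small nums hn i hi, pvF_at nums hn _ _ hj]
    have hdn : ((d.toNat : Int)) = d := Int.toNat_of_nonneg (pvCnd_nonneg ⟨hi, hj, hne, heq, hcase⟩)
    rw [hdn]
    linarith [heq]

theorem pvCnd_bound (nums : List Int)
    (hS : pvPsum nums (nums.length - 1) ≠ 0) {d : Int} {j i : Nat}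
    (h : pvCnd nums d j i) :
    d.toNat * nums.length + j < pvFuelA nums := by
  obtain ⟨hi, hj, hne, heq, hcase⟩ := h
  set n := nums.length with hnn
  set P := (nums.map Int.natAbs).sum with hP
  have h1S : 1 ≤ (pvPsum nums (n - 1)).natAbs := Int.natAbs_pos.2 hS
  have habs : (pvPsum nums i - pvPsum nums j).natAbs = d.natAbs * (pvPsum nums (n-1)).natAbs := by
    rw [heq, Int.natAbs_mul]
  have hble := Int.natAbs_sub_le (pvPsum nums i) (pvPsum nums j)
  have hiP : (pvPsum nums i).natAbs ≤ P := pvPsum_natAbs_le nums i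
  have hjP : (pvPsum nums j).natAbs ≤ P := pvPsum_natAbs_le nums j
  have hcS : d.natAbs ≤ d.natAbs * (pvPsum nums (n-1)).natAbs :=
    Nat.le_mul_of_pos_right _ (by omega)
  have hc2P : d.natAbs ≤ 2 * P := by omega
  have htn : d.toNat ≤ d.natAbs := by omega
  have hfa : pvFuelA nums = n * (2 * P + 2) := rfl
  calc d.toNat * n + j < (d.toNat + 1) * n := by rw [add_one_mul]; omega
  _ ≤ (2 * P + 2) * n := Nat.mul_le_mul_right n (by omega)
  _ = n * (2 * P + 2) := Nat.mul_comm _ _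
  _ = pvFuelA nums := hfa.symm

-- the collision after one full cycle when the total is zero
theorem pvCollide_cycle (nums : List Int) (hn : nums ≠ [])
    (hS : pvPsum nums (nums.length - 1) = 0) :
    pvCollideB nums nums.length = true := by
  have hn0 : 0 < nums.length := List.length_pos_of_ne_nil hn
  rw [pvCollideB_iff]
  refine ⟨0, hn0, ?_⟩
  have := pvF_at nums hn 1 0 hn0
  simp only [Nat.one_mul, Nat.add_zero] at this
  rw [pvF_small nums hn 0 hn0, this, hS]
  ring

-- orientation: one congruent pair of distinct positions yields a pvCnd candidate
theorem pvPre_cand (nums : List Int)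
    {i j : Nat} (hi : i < nums.length) (hj : j < nums.length) (hne : i ≠ j)
    (hdvd : pvPsum nums (nums.length - 1) ∣ (pvPsum nums i - pvPsum nums j)) :
    ∃ d j' i', pvCnd nums d j' i' := by
  obtain ⟨c, hc⟩ := hdvd
  rcases lt_trichotomy c 0 with hlt | heq0 | hgt
  · exact ⟨-c, i, j, hj, hi, fun e => hne e.symm, by linear_combination -hc, Or.inl (by omega)⟩
  · rcases Nat.lt_or_ge i j with hij | hij
    · exact ⟨0, j, i, hi, hj, hne, by linear_combination hc + pvPsum nums (nums.length - 1) * heq0, Or.inr ⟨rfl, hij⟩⟩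
    · have hij' : j < i := by omega
      exact ⟨0, i, j, hj, hi, fun e => hne e.symm, by linear_combination -hc - pvPsum nums (nums.length - 1) * heq0, Or.inr ⟨rfl, hij'⟩⟩
  · exact ⟨c, j, i, hi, hj, hne, by linear_combination hc, Or.inl hgt⟩

-- existence of a collision inside the fuel bound, from Pre_
theorem pvExists (nums : List Int) (hpre : Pre_find_2nd_occurrence nums) :
    ∃ t, t < pvFuelA nums ∧ pvCollideB nums t = true := by
  obtain ⟨hn, hcases⟩ := hpre
  have hn0 : 0 < nums.length := List.length_pos_of_ne_nil hn
  by_cases hS : pvPsum nums (nums.length - 1) = 0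
  · refine ⟨nums.length, ?_, pvCollide_cycle nums hn hS⟩
    have h2 : (1:Nat) < 2 * (nums.map Int.natAbs).sum + 2 := by omega
    have : nums.length * 1 < nums.length * (2 * (nums.map Int.natAbs).sum + 2) :=
      (Nat.mul_lt_mul_left hn0).2 h2
    simpa [pvFuelA] using this
  · rcases hcases with h0 | ⟨i, hi, j, hj, hne, hdvd⟩
    · exact absurd h0 hS
    obtain ⟨d, j', i', hcnd⟩ := pvPre_cand nums hi hj hne hdvd
    exact ⟨_, pvCnd_bound nums hS hcnd, pvCnd_collide nums hn hcnd⟩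

-- decomposing the least collision time as a candidate
theorem pvT_cand (nums : List Int) (hn : nums ≠ []) (hS : pvPsum nums (nums.length - 1) ≠ 0)
    (T : Nat) (hT : pvCollideB nums T = true) :
    ∃ d j i, pvCnd nums d j i ∧ d.toNat * nums.length + j ≤ T ∧ T % nums.length = j := by
  have hn0 : 0 < nums.length := List.length_pos_of_ne_nil hn
  set n := nums.length with hnn
  obtain ⟨s, hst, hfe⟩ := (pvCollideB_iff ..).1 hT
  have hdmT := Nat.div_add_mod T n
  have hdms := Nat.div_add_mod s n
  have hjn : T % n < n := Nat.mod_lt _ hn0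
  have hin : s % n < n := Nat.mod_lt _ hn0
  have hcc : s / n ≤ T / n := by
    by_contra hgt
    have h1 : T / n + 1 ≤ s / n := by omega
    have h3 : n * (T / n + 1) ≤ n * (s / n) := Nat.mul_le_mul_left _ h1
    have h2 : n * (T / n) + n ≤ n * (s / n) := by
      have e : n * (T / n + 1) = n * (T / n) + n := by ring
      omega
    omega
  rw [pvF_closed nums hn, pvF_closed nums hn] at hfe
  set d : Int := ((T / n : Nat) : Int) - ((s / n : Nat) : Int) with hd
  have hdnn : 0 ≤ d := by simp [hd]; exact_mod_cast hcc
  have heq : pvPsum nums (s % n) - pvPsum nums (T % n) = d * pvPsum nums (n - 1) := by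
    rw [hd]; linarith [hfe]
  have hne : s % n ≠ T % n := by
    intro he
    rw [he] at heq
    have h0 : d * pvPsum nums (n - 1) = 0 := by linarith [heq]
    rcases mul_eq_zero.1 h0 with hd0 | hS0
    · have h2 : ((T / n : Nat) : Int) - ((s / n : Nat) : Int) = 0 := by rw [← hd]; exact hd0
      have hdeq : T / n = s / n := by omega
      have hbc : n * (T / n) = n * (s / n) := by rw [hdeq]
      omega
    · exact hS hS0
  refine ⟨d, T % n, s % n, ⟨hin, hjn, hne, heq, ?_⟩, ?_, rfl⟩
  · rcases Nat.lt_or_ge (s / n) (T / n) with hlt | hge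
    · left; rw [hd]; push_cast; omega
    · have he : s / n = T / n := by omega
      have hbc : n * (s / n) = n * (T / n) := by rw [he]
      right
      constructor
      · rw [hd, he]; ring
      · omega
  · have htn : d.toNat = T / n - s / n := by rw [hd]; omega
    rw [htn, Nat.mul_comm]
    have e2 : n * (T / n - s / n) = n * (T / n) - n * (s / n) := Nat.mul_sub ..
    omega

-- ==== B-side: the prefix list is the list of pvPsum values ====

theorem pvPsum_cons_zero (x : Int) (xs : List Int) : pvPsum (x :: xs) 0 = x := by
  simp [pvPsum]

theorem pvPsum_cons_succ (x : Int) (xs : List Int) (k : Nat) :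
    pvPsum (x :: xs) (k+1) = x + pvPsum xs k := by
  simp [pvPsum]

theorem pvPrefix_fold (xs : List Int) : ∀ (l : List Int) (t : Int),
    xs.foldl (fun (acc : List Int × Int) x => (acc.1 ++ [acc.2 + x], acc.2 + x)) (l, t)
      = (l ++ (List.range xs.length).map (fun k => t + pvPsum xs k), t + xs.sum) := by
  induction xs with
  | nil => intro l t; simp
  | cons x xs ih =>
    intro l t
    rw [List.foldl_cons, ih]
    refine Prod.ext ?_ (by simp; ring)
    simp only [List.length_cons, List.range_succ_eq_map, List.map_cons, List.map_map,
      pvPsum_cons_zero, List.append_assoc, List.singleton_append]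
    congr 2
    apply List.map_congr_left
    intro k _
    simp only [Function.comp, pvPsum_cons_succ]
    ring

theorem pvPrefix_eq (nums : List Int) :
    pvPrefix nums = (List.range nums.length).map (pvPsum nums) := by
  unfold pvPrefix
  rw [pvPrefix_fold]
  simp

theorem pvPrefix_length (nums : List Int) : (pvPrefix nums).length = nums.length := by
  rw [pvPrefix_eq]; simp

theorem pvPrefix_getD (nums : List Int) (j : Nat) (hj : j < nums.length) :
    (pvPrefix nums).getD j 0 = pvPsum nums j := by
  rw [pvPrefix_eq]
  rw [List.getD_eq_getElem?_getD, List.getElem?_eq_getElem (by simpa using hj)]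
  simp

theorem pvPrefix_last (nums : List Int) (hn : nums ≠ []) :
    PySem.List.pyGetD (pvPrefix nums) (-1) 0 = pvPsum nums (nums.length - 1) := by
  have hn0 : 0 < nums.length := List.length_pos_of_ne_nil hn
  have hne : pvPrefix nums ≠ [] := by
    intro h
    have := pvPrefix_length nums
    rw [h] at this
    simp at this
    omega
  rw [PySem.List.pyGetD_neg_ofNat _ 1 0 (by omega) (by rw [pvPrefix_length]; omega)]
  have hlt : (pvPrefix nums).length - 1 < (pvPrefix nums).length := by
    rw [pvPrefix_length]; omega
  rw [← List.getD_eq_getElem (pvPrefix nums) 0 hlt, pvPrefix_length,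
    pvPrefix_getD nums _ (by omega)]

-- ==== B-side, total = 0: the duplicate scan ====

theorem pvPrefix_take_contains (nums : List Int) (k : Nat) (hk : k ≤ nums.length) (x : Int) :
    ((pvPrefix nums).take k).contains x = true ↔ ∃ s < k, pvPsum nums s = x := by
  rw [pvPrefix_eq, ← List.map_take, List.take_range, Nat.min_eq_left hk]
  rw [List.contains_iff_mem]
  constructor
  · intro h
    obtain ⟨s, hs, he⟩ := List.mem_map.1 h
    exact ⟨s, List.mem_range.1 hs, he⟩
  · rintro ⟨s, hs, he⟩
    exact List.mem_map.2 ⟨s, List.mem_range.2 hs, he⟩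

theorem pvPrefix_drop (nums : List Int) (k : Nat) (hk : k < nums.length) :
    (pvPrefix nums).drop k = pvPsum nums k :: (pvPrefix nums).drop (k+1) := by
  have hk' : k < (pvPrefix nums).length := by rw [pvPrefix_length]; exact hk
  rw [List.drop_eq_getElem_cons hk']
  congr 1
  rw [← List.getD_eq_getElem (pvPrefix nums) 0 hk', pvPrefix_getD nums k hk]

-- ==== B-side, total = 0: the duplicate scan finds the least collision ====

theorem pvScanDup_hit (nums : List Int) (hn : nums ≠ []) (T : Nat) (hTn : T < nums.length)
    (hT : pvCollideB nums T = true) (hmin : ∀ s, s < T → pvCollideB nums s = false) :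
    ∀ m k, k + m = T → pvScanDup ((pvPrefix nums).take k) ((pvPrefix nums).drop k)
      = some (pvF nums T) := by
  intro m
  induction m with
  | zero =>
    intro k hk
    have hkT : k = T := by omega
    subst hkT
    rw [pvPrefix_drop nums k hTn, pvScanDup]
    have hc : ((pvPrefix nums).take k).contains (pvPsum nums k) = true := by
      rw [pvPrefix_take_contains nums k (by omega)]
      obtain ⟨s, hs, he⟩ := (pvCollideB_iff ..).1 hT
      exact ⟨s, hs, by rw [← pvF_small nums hn s (by omega), he, pvF_small nums hn k hTn]⟩
    rw [if_pos hc, pvF_small nums hn k hTn]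
  | succ m ih =>
    intro k hk
    have hkn : k < nums.length := by omega
    rw [pvPrefix_drop nums k hkn, pvScanDup]
    have hc : ((pvPrefix nums).take k).contains (pvPsum nums k) = false := by
      rw [Bool.eq_false_iff]
      intro hmem
      rw [pvPrefix_take_contains nums k (by omega)] at hmem
      obtain ⟨s, hs, he⟩ := hmem
      have : pvCollideB nums k = true := (pvCollideB_iff ..).2
        ⟨s, hs, by rw [pvF_small nums hn s (by omega), pvF_small nums hn k hkn]; exact he⟩
      rw [hmin k (by omega)] at this
      exact Bool.noConfusion this
    rw [if_neg (by simpa using hc)]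
    have htake : (pvPrefix nums).take k ++ [pvPsum nums k] = (pvPrefix nums).take (k+1) := by
      rw [List.take_add_one, List.getElem?_eq_getElem (by rw [pvPrefix_length]; exact hkn)]
      simp only [Option.toList_some]
      congr 1
      rw [← List.getD_eq_getElem (pvPrefix nums) 0 (by rw [pvPrefix_length]; exact hkn),
        pvPrefix_getD nums k hkn]
    rw [htake]
    exact ih (k+1) (by omega)

theorem pvScanDup_none (nums : List Int) (hn : nums ≠ [])
    (hall : ∀ t, t < nums.length → pvCollideB nums t = false) :
    ∀ m k, k + m = nums.length →
      pvScanDup ((pvPrefix nums).take k) ((pvPrefix nums).drop k) = none := by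
  intro m
  induction m with
  | zero =>
    intro k hk
    rw [List.drop_of_length_le (by rw [pvPrefix_length]; omega), pvScanDup]
  | succ m ih =>
    intro k hk
    have hkn : k < nums.length := by omega
    rw [pvPrefix_drop nums k hkn, pvScanDup]
    have hc : ((pvPrefix nums).take k).contains (pvPsum nums k) = false := by
      rw [Bool.eq_false_iff]
      intro hmem
      rw [pvPrefix_take_contains nums k (by omega)] at hmem
      obtain ⟨s, hs, he⟩ := hmem
      have : pvCollideB nums k = true := (pvCollideB_iff ..).2
        ⟨s, hs, by rw [pvF_small nums hn s (by omega), pvF_small nums hn k hkn]; exact he⟩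
      rw [hall k hkn] at this
      exact Bool.noConfusion this
    rw [if_neg (by simpa using hc)]
    have htake : (pvPrefix nums).take k ++ [pvPsum nums k] = (pvPrefix nums).take (k+1) := by
      rw [List.take_add_one, List.getElem?_eq_getElem (by rw [pvPrefix_length]; exact hkn)]
      simp only [Option.toList_some]
      congr 1
      rw [← List.getD_eq_getElem (pvPrefix nums) 0 (by rw [pvPrefix_length]; exact hkn),
        pvPrefix_getD nums k hkn]
    rw [htake]
    exact ih (k+1) (by omega)

-- ==== B-side, total ≠ 0: the pair scan computes the lexicographically least candidate ====

def pvInv (nums : List Int) (done : List (Nat × Nat)) : Option (Int × Nat × Int) → Prop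
  | none => ∀ q ∈ done, ∀ d, ¬ pvCnd nums d q.1 q.2
  | some (d, j, v) =>
      (∃ i, (j, i) ∈ done ∧ pvCnd nums d j i) ∧
      v = pvPsum nums j + d * pvPsum nums (nums.length - 1) ∧
      ∀ q ∈ done, ∀ d', pvCnd nums d' q.1 q.2 → (d < d' ∨ (d = d' ∧ j ≤ q.1))

theorem pvInv_extend (nums : List Int) (done : List (Nat × Nat))
    (best : Option (Int × Nat × Int)) (q : Nat × Nat)
    (hq : ∀ d, ¬ pvCnd nums d q.1 q.2) (h : pvInv nums done best) :
    pvInv nums (done ++ [q]) best := by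
  cases best with
  | none =>
    simp only [pvInv] at h ⊢
    intro r hr d
    rcases List.mem_append.1 hr with hr' | hr'
    · exact h r hr' d
    · have : r = q := List.mem_singleton.1 hr'
      subst this
      exact hq d
  | some b =>
    obtain ⟨bd, bj, bv⟩ := b
    simp only [pvInv] at h ⊢
    obtain ⟨⟨iw, hiw, hiwC⟩, hbv, hmin⟩ := h
    refine ⟨⟨iw, List.mem_append_left _ hiw, hiwC⟩, hbv, ?_⟩
    intro r hr d'
    rcases List.mem_append.1 hr with hr' | hr'
    · exact hmin r hr' d'
    · have : r = q := List.mem_singleton.1 hr'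
      subst this
      exact fun hc => absurd hc (hq d')

theorem pvStep_inv (nums : List Int)
    (hS : pvPsum nums (nums.length - 1) ≠ 0) (j i : Nat)
    (hj : j < nums.length) (hi : i < nums.length)
    (done : List (Nat × Nat)) (best : Option (Int × Nat × Int))
    (h : pvInv nums done best) :
    pvInv nums (done ++ [(j, i)])
      (pvStep (pvPrefix nums) (pvPsum nums (nums.length - 1)) j i best) := by
  have hpi := pvPrefix_getD nums i hi
  have hpj := pvPrefix_getD nums j hj
  simp only [pvStep, hpi, hpj]
  by_cases h1 : i ≠ j ∧
      PySem.Int.mod (pvPsum nums i - pvPsum nums j) (pvPsum nums (nums.length - 1)) = 0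
  · rw [if_pos h1]
    obtain ⟨hij, hmod⟩ := h1
    have hdvd : pvPsum nums (nums.length - 1) ∣ (pvPsum nums i - pvPsum nums j) :=
      (PySem.Int.mod_eq_zero_iff_dvd _ _).1 hmod
    set d := PySem.Int.floordiv (pvPsum nums i - pvPsum nums j)
      (pvPsum nums (nums.length - 1)) with hddef
    have hdS : pvPsum nums i - pvPsum nums j = d * pvPsum nums (nums.length - 1) := by
      have h2 := PySem.Int.floordiv_mul_add_mod (pvPsum nums i - pvPsum nums j)
        (pvPsum nums (nums.length - 1))
      rw [hmod] at h2
      rw [← hddef] at h2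
      linarith [h2]
    have huniq : ∀ d', pvCnd nums d' j i → d' = d := by
      intro d' h'
      have he : d' * pvPsum nums (nums.length - 1) = d * pvPsum nums (nums.length - 1) := by
        linarith [hdS, h'.2.2.2.1]
      exact mul_right_cancel₀ hS he
    by_cases h2 : 0 < d ∨ (d = 0 ∧ i < j)
    · rw [if_pos h2]
      have hC : pvCnd nums d j i := ⟨hi, hj, hij, hdS, h2⟩
      have hmemnew : (j, i) ∈ done ++ [(j, i)] :=
        List.mem_append_right _ (List.mem_singleton.2 rfl)
      cases best with
      | none =>
        simp only [pvInv] at h ⊢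
        refine ⟨⟨i, hmemnew, hC⟩, by linarith [hdS], ?_⟩
        intro q hq d' hcnd
        rcases List.mem_append.1 hq with hq' | hq'
        · exact absurd hcnd (h q hq' d')
        · have : q = (j, i) := List.mem_singleton.1 hq'
          subst this
          have := huniq d' hcnd
          omega
      | some b =>
        obtain ⟨bd, bj, bv⟩ := b
        simp only [pvInv] at h
        obtain ⟨⟨iw, hiw, hiwC⟩, hbv, hmin⟩ := h
        show pvInv nums (done ++ [(j, i)])
          (if d < bd ∨ d = bd ∧ j < bj then some (d, j, pvPsum nums i) else some (bd, bj, bv))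
        by_cases h3 : d < bd ∨ (d = bd ∧ j < bj)
        · rw [if_pos h3]
          simp only [pvInv]
          refine ⟨⟨i, hmemnew, hC⟩, by linarith [hdS], ?_⟩
          intro q hq d' hcnd
          rcases List.mem_append.1 hq with hq' | hq'
          · have := hmin q hq' d' hcnd
            omega
          · have : q = (j, i) := List.mem_singleton.1 hq'
            subst this
            have := huniq d' hcnd
            omega
        · rw [if_neg h3]
          simp only [pvInv]
          refine ⟨⟨iw, List.mem_append_left _ hiw, hiwC⟩, hbv, ?_⟩
          intro q hq d' hcnd
          rcases List.mem_append.1 hq with hq' | hq'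
          · exact hmin q hq' d' hcnd
          · have : q = (j, i) := List.mem_singleton.1 hq'
            subst this
            have := huniq d' hcnd
            omega
    · rw [if_neg h2]
      have hnoc : ∀ d', ¬ pvCnd nums d' j i := by
        intro d' hc
        exact h2 ((huniq d' hc) ▸ hc.2.2.2.2)
      exact pvInv_extend nums done best (j, i) hnoc h
  · rw [if_neg h1]
    have hnoc : ∀ d', ¬ pvCnd nums d' j i := by
      intro d' hc
      exact h1 ⟨hc.2.2.1, (PySem.Int.mod_eq_zero_iff_dvd _ _).2 ⟨d', by linarith [hc.2.2.2.1]⟩⟩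
    exact pvInv_extend nums done best (j, i) hnoc h

theorem pvFold_inv (nums : List Int)
    (hS : pvPsum nums (nums.length - 1) ≠ 0) :
    ∀ (ps : List (Nat × Nat)) (done : List (Nat × Nat)) (best : Option (Int × Nat × Int)),
      (∀ q ∈ ps, q.1 < nums.length ∧ q.2 < nums.length) → pvInv nums done best →
      pvInv nums (done ++ ps)
        (ps.foldl (fun b q => pvStep (pvPrefix nums) (pvPsum nums (nums.length - 1)) q.1 q.2 b)
          best) := by
  intro ps
  induction ps with
  | nil => intro done best _ h; simpa using h
  | cons q ps ih =>
    intro done best hall h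
    rw [List.foldl_cons]
    have h1 := pvStep_inv nums hS q.1 q.2 (hall q (List.mem_cons_self ..)).1
      (hall q (List.mem_cons_self ..)).2 done best h
    have h2 := ih (done ++ [q]) _ (fun r hr => hall r (List.mem_cons_of_mem _ hr)) h1
    simpa [List.append_assoc] using h2

def pvPairs (n : Nat) : List (Nat × Nat) :=
  (List.range n).flatMap (fun j => (List.range n).map (fun i => (j, i)))

theorem pvFoldFlat {γ : Type} (F : γ → Nat → Nat → γ) (l2 : List Nat) :
    ∀ (l1 : List Nat) (init : γ),
      l1.foldl (fun b j => l2.foldl (fun b i => F b j i) b) init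
        = (l1.flatMap (fun j => l2.map (fun i => (j, i)))).foldl (fun b q => F b q.1 q.2) init := by
  intro l1
  induction l1 with
  | nil => intro init; rfl
  | cons j l1 ih =>
    intro init
    rw [List.foldl_cons, List.flatMap_cons, List.foldl_append, List.foldl_map]
    exact ih _

theorem pvBest_eq (nums : List Int) (total : Int) :
    pvBest (pvPrefix nums) total
      = (pvPairs nums.length).foldl
          (fun b q => pvStep (pvPrefix nums) total q.1 q.2 b) none := by
  unfold pvBest pvPairs
  rw [pvPrefix_length]
  exact pvFoldFlat _ _ _ _

theorem pvPairs_mem (n : Nat) (q : Nat × Nat) : q ∈ pvPairs n ↔ q.1 < n ∧ q.2 < n := by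
  obtain ⟨a, b⟩ := q
  simp [pvPairs]

-- the lexicographic order on (cycle count, position) is the order of collision times
theorem pvLex_le (n : Nat) (d d' : Int) (j j' : Nat) (hd : 0 ≤ d) (hd' : 0 ≤ d')
    (hj : j < n) (hlex : d < d' ∨ (d = d' ∧ j ≤ j')) :
    d.toNat * n + j ≤ d'.toNat * n + j' := by
  rcases hlex with h | ⟨h, hjj⟩
  · have h4 : d.toNat + 1 ≤ d'.toNat := by omega
    have h5 : (d.toNat + 1) * n ≤ d'.toNat * n := Nat.mul_le_mul_right _ h4
    have e : (d.toNat + 1) * n = d.toNat * n + n := by ring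
    omega
  · have he : d.toNat = d'.toNat := by omega
    have : d.toNat * n = d'.toNat * n := by rw [he]
    omega

theorem pvAlt_sne (nums : List Int) (hn : nums ≠ [])
    (hS : pvPsum nums (nums.length - 1) ≠ 0) (hex : ∃ t, pvCollideB nums t = true) :
    find_2nd_occurrence_alt nums = pvF nums (Nat.find hex) := by
  have hn0 : 0 < nums.length := List.length_pos_of_ne_nil hn
  set T := Nat.find hex with hTdef
  have hT : pvCollideB nums T = true := Nat.find_spec hex
  obtain ⟨d0, j0, i0, hC0, hle0, hmod0⟩ := pvT_cand nums hn hS T hT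
  have hinv0 : pvInv nums [] none := by
    simp only [pvInv]
    intro q hq
    simp at hq
  have hinv := pvFold_inv nums hS (pvPairs nums.length) [] none
    (fun q hq => (pvPairs_mem ..).1 hq) hinv0
  rw [List.nil_append] at hinv
  cases hbest : (pvPairs nums.length).foldl
      (fun b q => pvStep (pvPrefix nums) (pvPsum nums (nums.length - 1)) q.1 q.2 b) none with
  | none =>
    rw [hbest] at hinv
    simp only [pvInv] at hinv
    exact absurd hC0 (hinv (j0, i0) ((pvPairs_mem ..).2 ⟨hC0.2.1, hC0.1⟩) d0)
  | some b =>
    obtain ⟨d, j, v⟩ := b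
    rw [hbest] at hinv
    simp only [pvInv] at hinv
    obtain ⟨⟨i, hmem, hC⟩, hv, hmin⟩ := hinv
    -- T ≤ collision time of the best candidate
    have hTle : T ≤ d.toNat * nums.length + j :=
      Nat.find_min' hex (pvCnd_collide nums hn hC)
    -- best candidate's time ≤ candidate extracted from T, which is ≤ T
    have hlex := hmin (j0, i0) ((pvPairs_mem ..).2 ⟨hC0.2.1, hC0.1⟩) d0 hC0
    have hnum : d.toNat * nums.length + j ≤ d0.toNat * nums.length + j0 :=
      pvLex_le nums.length d d0 j j0 (pvCnd_nonneg hC) (pvCnd_nonneg hC0) hC.2.1 hlex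
    have hTeq : T = d.toNat * nums.length + j := by omega
    -- evaluate B
    show (let pfx := pvPrefix nums;
      let total := PySem.List.pyGetD pfx (-1) 0;
      if total = 0 then
        match pvScanDup [] pfx with
        | some v => v
        | none => pfx.getD 0 0
      else
        match pvBest pfx total with
        | some (_, _, v) => v
        | none => 0) = pvF nums T
    simp only [pvPrefix_last nums hn]
    rw [if_neg hS, pvBest_eq, hbest]
    rw [hTeq, pvF_at nums hn d.toNat j hC.2.1, Int.toNat_of_nonneg (pvCnd_nonneg hC)]
    exact hv

theorem pvAlt_s0 (nums : List Int) (hn : nums ≠ [])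
    (hS : pvPsum nums (nums.length - 1) = 0) (hex : ∃ t, pvCollideB nums t = true) :
    find_2nd_occurrence_alt nums = pvF nums (Nat.find hex) := by
  have hn0 : 0 < nums.length := List.length_pos_of_ne_nil hn
  set T := Nat.find hex with hTdef
  have hT : pvCollideB nums T = true := Nat.find_spec hex
  have hmin : ∀ s, s < T → pvCollideB nums s = false := by
    intro s hs
    have := Nat.find_min hex hs
    simpa using this
  show (let pfx := pvPrefix nums;
    let total := PySem.List.pyGetD pfx (-1) 0;
    if total = 0 then
      match pvScanDup [] pfx with
      | some v => v
      | none => pfx.getD 0 0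
    else
      match pvBest pfx total with
      | some (_, _, v) => v
      | none => 0) = pvF nums T
  simp only [pvPrefix_last nums hn]
  rw [if_pos hS]
  by_cases hTn : T < nums.length
  · have := pvScanDup_hit nums hn T hTn hT hmin T 0 (by omega)
    simp only [List.take_zero, List.drop_zero] at this
    rw [this]
  · have hcy : pvCollideB nums nums.length = true := pvCollide_cycle nums hn hS
    have hTle : T ≤ nums.length := Nat.find_min' hex hcy
    have hTeq : T = nums.length := by omega
    have hnone := pvScanDup_none nums hn (fun t ht => hmin t (by omega)) nums.length 0 (by omega)
    simp only [List.take_zero, List.drop_zero] at hnone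
    rw [hnone]
    have h1 := pvF_at nums hn 1 0 hn0
    simp only [Nat.one_mul, Nat.add_zero] at h1
    rw [hTeq, h1, hS, pvPrefix_getD nums 0 hn0]
    ring

theorem pvA_eq (nums : List Int) (hex : ∃ t, pvCollideB nums t = true)
    (hfuel : Nat.find hex < pvFuelA nums) :
    find_2nd_occurrence nums = pvF nums (Nat.find hex) := by
  unfold find_2nd_occurrence
  apply pvLoopA_spec nums (Nat.find hex) (Nat.find_spec hex)
    (fun s hs => by have := Nat.find_min hex hs; simpa using this)
  · exact Nat.zero_le _
  · omega
  · rw [Nat.zero_mod]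
    simp [pvF]
  · intro x
    simp [PySem.Set.empty, PySem.Set.contains]

-- ===== VERDICT (by name: the statement is the Claim_ definition above) =====
theorem find_2nd_occurrence_spec : Claim_equal_find_2nd_occurrence := by
  unfold Claim_equal_find_2nd_occurrence
  intro nums hdom hpre
  unfold Spec_find_2nd_occurrence
  obtain ⟨t0, hlt, hcol⟩ := pvExists nums hpre
  have hex : ∃ t, pvCollideB nums t = true := ⟨t0, hcol⟩
  have hn : nums ≠ [] := hpre.1
  have hfuel : Nat.find hex < pvFuelA nums := lt_of_le_of_lt (Nat.find_min' hex hcol) hlt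
  rw [pvA_eq nums hex hfuel]
  by_cases hS : pvPsum nums (nums.length - 1) = 0
  · rw [pvAlt_s0 nums hn hS hex]
  · rw [pvAlt_sne nums hn hS hex]
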